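-- pv_equiv track=rewrite | github.com/liqianyue/zeitgeist | m6A_BERT_Stacking/data_extract.py | sequence_mer_get_list
-- ===== SOURCE A (Python) =====
-- def sequence_mer_get_list(data_frame):
--     acid_list = ["A", "C", "G", "U"]
--     vocab_dict = {}
--     loc = 0
--     for i in acid_list:
--         for j in acid_list:
--             for k in acid_list:
--                 vocab_loc = i + j + k
--                 vocab_dict[vocab_loc] = loc
--                 loc += 1
--     sequence_list = []
--     for j in range(len(data_frame) - 2):
--         sequence_list.append(vocab_dict[data_frame[j:j + 3]])
--     return sequence_list
-- ===== SOURCE B (Python) =====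
-- def sequence_mer_get_list(data_frame):
--     val = {'A': 0, 'C': 1, 'G': 2, 'U': 3}
--     return [16 * val[a] + 4 * val[b] + val[c]
--             for a, b, c in zip(data_frame, data_frame[1:], data_frame[2:])]
-- ===== Notes on version B (the rewrite author's own statement) =====
-- stated objective: simpler
-- what changed: Replaces the 64-entry precomputed 3-mer vocabulary dict and per-window string slicing with a 4-entry base-value map and a closed-form base-4 index 16*val[a]+4*val[b]+val[c] over the zipped adjacent characters.
import Mathlib
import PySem

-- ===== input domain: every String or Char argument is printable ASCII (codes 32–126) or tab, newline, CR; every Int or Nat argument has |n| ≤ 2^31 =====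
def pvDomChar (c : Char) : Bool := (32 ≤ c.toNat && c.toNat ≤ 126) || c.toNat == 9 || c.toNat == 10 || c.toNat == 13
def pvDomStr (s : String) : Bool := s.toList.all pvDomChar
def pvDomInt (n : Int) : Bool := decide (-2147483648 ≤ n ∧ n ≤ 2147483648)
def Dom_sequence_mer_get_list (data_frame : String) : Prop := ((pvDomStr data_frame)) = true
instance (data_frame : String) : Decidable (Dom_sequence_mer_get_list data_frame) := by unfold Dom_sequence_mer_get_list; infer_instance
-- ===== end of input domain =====

-- B replaces A's 64-entry 3-mer vocabulary dict + window slicing by a 4-entry base-value map and the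
-- closed-form base-4 index 16*val[a]+4*val[b]+val[c] over zipped adjacent characters (objective: simpler).

-- ===== PORT A =====
-- acid_list = ["A", "C", "G", "U"]  (strings ported on their List Char side, as PySem does)
def pvAcid : List (List Char) := [['A'], ['C'], ['G'], ['U']]

-- the triple loop building vocab_dict (and loc), hoisted as a named constant helper
def pvVocabLoop : PySem.Dict (List Char) Int × Int :=
  pvAcid.foldl (fun st i =>
    pvAcid.foldl (fun st j =>
      pvAcid.foldl (fun st k =>
        (PySem.Dict.insert st.1 (i ++ j ++ k) st.2, st.2 + 1)) st) st)
    ((PySem.Dict.empty : PySem.Dict (List Char) Int), 0)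

-- vocab_dict[data_frame[j:j+3]] raises KeyError on a missing key; that case is excluded by Pre_,
-- so the port uses getD 0 there.
def sequence_mer_get_list (data_frame : String) : List Int :=
  (PySem.List.pyRange 0 ((data_frame.toList.length : Int) - 2) 1).foldl
    (fun acc j =>
      acc ++ [((pvVocabLoop.1.get? (PySem.List.slice data_frame.toList (some j) (some (j + 3)))).getD 0)])
    []

-- ===== PORT B =====
-- val = {'A': 0, 'C': 1, 'G': 2, 'U': 3}
def pvVal : PySem.Dict Char Int := PySem.Dict.ofList [('A', 0), ('C', 1), ('G', 2), ('U', 3)]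

-- val[c]; KeyError (missing key) is excluded by Pre_, so getD 0 there
def pvValGet (c : Char) : Int := (pvVal.get? c).getD 0

def sequence_mer_get_list_alt (data_frame : String) : List Int :=
  (data_frame.toList.zip ((data_frame.toList.drop 1).zip (data_frame.toList.drop 2))).map
    (fun p => 16 * pvValGet p.1 + 4 * pvValGet p.2.1 + pvValGet p.2.2)

-- ===== PRECONDITION & SPEC =====
-- Pre_ excludes exactly the inputs on which A raises KeyError: a string of length ≥ 3 containing a
-- character outside {A,C,G,U} (then some 3-window is not in the vocabulary).
def Pre_sequence_mer_get_list (data_frame : String) : Prop :=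
  data_frame.toList.length < 3 ∨
    (data_frame.toList.all (fun c => c == 'A' || c == 'C' || c == 'G' || c == 'U')) = true
instance (data_frame : String) : Decidable (Pre_sequence_mer_get_list data_frame) := by
  unfold Pre_sequence_mer_get_list; infer_instance

def pvWitness_sequence_mer_get_list : String := "GAUCAG"

def Spec_sequence_mer_get_list (data_frame : String) (out : List Int) : Prop :=
  out = sequence_mer_get_list_alt data_frame
instance (data_frame : String) (out : List Int) : Decidable (Spec_sequence_mer_get_list data_frame out) := by
  unfold Spec_sequence_mer_get_list; infer_instance

-- ===== CLAIM (what is proved, stated in full; the proofs are below) =====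
def Claim_equal_sequence_mer_get_list : Prop :=
  ∀ (data_frame : String), Dom_sequence_mer_get_list data_frame →
    Pre_sequence_mer_get_list data_frame →
    Spec_sequence_mer_get_list data_frame (sequence_mer_get_list data_frame)

-- ===== LEMMAS AND PROOFS =====

-- the vocabulary lookup of a 3-mer over {A,C,G,U} is the base-4 closed form
set_option maxRecDepth 8192 in
lemma pv_lookup_eq (a b c : Char)
    (ha : a = 'A' ∨ a = 'C' ∨ a = 'G' ∨ a = 'U')
    (hb : b = 'A' ∨ b = 'C' ∨ b = 'G' ∨ b = 'U')
    (hc : c = 'A' ∨ c = 'C' ∨ c = 'G' ∨ c = 'U') :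
    (pvVocabLoop.1.get? [a, b, c]).getD 0 = 16 * pvValGet a + 4 * pvValGet b + pvValGet c := by
  rcases ha with rfl | rfl | rfl | rfl <;> rcases hb with rfl | rfl | rfl | rfl <;>
    rcases hc with rfl | rfl | rfl | rfl <;> decide

lemma pv_take3 (cs : List Char) (k : Nat) (h : k + 2 < cs.length) :
    (cs.drop k).take 3 = [cs[k], cs[k + 1], cs[k + 2]] := by
  rw [List.drop_eq_getElem_cons (by omega), List.drop_eq_getElem_cons (by omega),
    List.drop_eq_getElem_cons (by omega)]
  rfl

-- ===== VERDICT (by name: the statement is the Claim_ definition above) =====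
theorem sequence_mer_get_list_spec : Claim_equal_sequence_mer_get_list := by
  intro s _ hpre
  unfold Spec_sequence_mer_get_list sequence_mer_get_list sequence_mer_get_list_alt
  rw [PySem.List.foldl_append_singleton_eq_map, List.nil_append]
  apply List.ext_getElem
  · simp only [List.length_map, List.length_zip, List.length_drop,
      PySem.List.length_pyRange_one]
    omega
  · intro k hk1 hk2
    have hklt : k + 2 < s.toList.length := by
      simp only [List.length_map, PySem.List.length_pyRange_one] at hk1; omega
    have hacgu : ∀ c ∈ s.toList, c = 'A' ∨ c = 'C' ∨ c = 'G' ∨ c = 'U' := by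
      rcases hpre with h | h
      · exact absurd hklt (by omega)
      · intro c hc
        have hx := List.all_eq_true.mp h c hc
        simp only [Bool.or_eq_true, beq_iff_eq] at hx
        tauto
    simp only [List.getElem_map, PySem.List.getElem_pyRange_one, List.getElem_zip,
      List.getElem_drop]
    rw [zero_add]
    have h3 : ((k : Int) + 3) = ((k + 3 : Nat) : Int) := by push_cast; ring
    have hd : k + 3 - k = 3 := by omega
    rw [h3, PySem.List.slice_natCast, hd, pv_take3 s.toList k hklt]
    simp only [Nat.add_comm 1 k, Nat.add_comm 2 k]
    exact pv_lookup_eq _ _ _ (hacgu _ (List.getElem_mem _)) (hacgu _ (List.getElem_mem _))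
      (hacgu _ (List.getElem_mem _))
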